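-- pv_equiv track=rewrite | github.com/MisterEnzo/codecademy-challenges | HurricaneAnalysis.py | most_hit
-- ===== SOURCE A (Python) =====
-- def most_hit(dict):
--   hits = 0
--   most_hit = []
--   for k, v in dict.items():
--     if v > hits:
--       hits = v
--       most_hit = [k]
--     elif v == hits:
--       most_hit.append(k)
--   return hits, most_hit
-- ===== SOURCE B (Python) =====
-- def most_hit(dict):
--   hits = max([0, *dict.values()])
--   return hits, [k for k, v in dict.items() if v == hits]
-- ===== Notes on version B (the rewrite author's own statement) =====
-- stated objective: simpler
-- what changed: Replaces A's single running-max pass with tie-collection and resets by two plain passes: compute the peak as max([0, *values]), then filter the keys equal to it in insertion order.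
import Mathlib
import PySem

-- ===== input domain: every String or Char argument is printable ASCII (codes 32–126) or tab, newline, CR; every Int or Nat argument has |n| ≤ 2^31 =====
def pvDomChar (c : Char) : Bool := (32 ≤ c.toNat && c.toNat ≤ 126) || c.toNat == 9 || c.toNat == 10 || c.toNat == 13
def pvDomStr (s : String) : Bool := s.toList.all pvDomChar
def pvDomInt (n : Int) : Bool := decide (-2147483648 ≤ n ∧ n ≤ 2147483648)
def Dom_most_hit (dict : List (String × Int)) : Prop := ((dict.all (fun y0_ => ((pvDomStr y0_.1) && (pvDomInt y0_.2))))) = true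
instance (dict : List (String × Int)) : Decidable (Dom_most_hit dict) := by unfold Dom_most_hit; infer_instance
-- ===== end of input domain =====

-- B computes the peak as max over [0, *values] and then filters the keys equal to it (two plain passes instead of A's running-max pass with resets); same values, no speed claim.


-- ===== PORT A =====
-- literal fold over the pairs with state (hits, most_hit), branches in A's order
def most_hit (dict : List (String × Int)) : Int × List String :=
  dict.foldl (fun s kv =>
    if kv.2 > s.1 then (kv.2, [kv.1])
    else if kv.2 = s.1 then (s.1, s.2 ++ [kv.1])
    else s) (0, [])

-- ===== PORT B =====
-- hits = max([0, *values]); then filter the keys whose value equals hits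
def most_hit_alt (dict : List (String × Int)) : Int × List String :=
  let hits := (dict.map Prod.snd).foldl max 0
  (hits, (dict.filter (fun kv => kv.2 = hits)).map Prod.fst)

-- ===== PRECONDITION & SPEC =====
def Spec_most_hit (dict : List (String × Int)) (out : Int × List String) : Prop := out = most_hit_alt dict
instance (dict : List (String × Int)) (out : Int × List String) : Decidable (Spec_most_hit dict out) := by unfold Spec_most_hit; infer_instance

-- ===== CLAIM (what is proved, stated in full; the proofs are below) =====
def Claim_equal_most_hit : Prop := ∀ (dict : List (String × Int)), Dom_most_hit dict → Spec_most_hit dict (most_hit dict)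

-- ===== LEMMAS AND PROOFS =====

theorem le_foldl_max (l : List Int) (h : Int) : h ≤ l.foldl max h := by
  induction l generalizing h with
  | nil => simp
  | cons x xs ih => exact le_trans (le_max_left h x) (ih (max h x))

theorem most_hit_loop_inv (l : List (String × Int)) (h : Int) (acc : List String) :
    l.foldl (fun s kv =>
      if kv.2 > s.1 then (kv.2, [kv.1])
      else if kv.2 = s.1 then (s.1, s.2 ++ [kv.1])
      else s) (h, acc)
    = ((l.map Prod.snd).foldl max h,
       (if (l.map Prod.snd).foldl max h = h then acc else [])
         ++ (l.filter (fun kv => kv.2 = (l.map Prod.snd).foldl max h)).map Prod.fst) := by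
  induction l generalizing h acc with
  | nil => simp
  | cons kv l ih =>
    obtain ⟨k, v⟩ := kv
    simp only [List.foldl_cons, List.map_cons, List.filter_cons]
    by_cases hgt : v > h
    · simp only [max_eq_right hgt.le]
      rw [if_pos hgt, ih]
      have hM : v ≤ (l.map Prod.snd).foldl max v := le_foldl_max _ _
      by_cases hv : (l.map Prod.snd).foldl max v = v
      · simp [hv, show ¬ (v = h) by omega]
      · have h2 : ¬ (v = (l.map Prod.snd).foldl max v) := fun e => hv e.symm
        have h1 : ¬ ((l.map Prod.snd).foldl max v = h) := by omega
        simp [hv, h1, h2]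
    · by_cases heq : v = h
      · subst heq
        simp only [max_self]
        rw [if_neg hgt]
        simp only [if_true]
        rw [ih]
        have hM : v ≤ (l.map Prod.snd).foldl max v := le_foldl_max _ _
        by_cases hv : (l.map Prod.snd).foldl max v = v
        · simp [hv]
        · have h2 : ¬ (v = (l.map Prod.snd).foldl max v) := fun e => hv e.symm
          simp [hv, h2]
      · have hlt : v < h := by omega
        simp only [max_eq_left hlt.le]
        rw [if_neg hgt, if_neg heq, ih]
        have hM : h ≤ (l.map Prod.snd).foldl max h := le_foldl_max _ _
        have h2 : ¬ (v = (l.map Prod.snd).foldl max h) := by omega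
        simp [h2]

-- ===== VERDICT (by name: the statement is the Claim_ definition above) =====
theorem most_hit_spec : Claim_equal_most_hit := by
  intro dict _
  unfold Spec_most_hit most_hit most_hit_alt
  rw [most_hit_loop_inv]
  simp
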